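-- pv_equiv track=rewrite | github.com/soletty/wizadry | wizardry/ui/components/diff_viewer.py | group_diff_lines
-- ===== SOURCE A (Python) =====
-- from typing import List, Tuple
--
-- def group_diff_lines(lines: List[Tuple[str, str]]) -> List[Tuple[str, List[str]]]:
--     """Group consecutive lines of the same type."""
--     if not lines:
--         return []
--
--     grouped = []
--     current_type = None
--     current_lines = []
--
--     for line_type, line_content in lines:
--         if line_type != current_type:
--             if current_lines:
--                 grouped.append((current_type, current_lines))
--             current_type = line_type
--             current_lines = [line_content]
--         else:
--             current_lines.append(line_content)
--
--     if current_lines: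
--         grouped.append((current_type, current_lines))
--
--     return grouped
-- ===== SOURCE B (Python) =====
-- from typing import List, Tuple
--
-- def group_diff_lines(lines: List[Tuple[str, str]]) -> List[Tuple[str, List[str]]]:
--     """Group consecutive lines of the same type, building the result back-to-front:
--     scan the input in reverse and merge each line into the head group of the result,
--     so there is no pending-run accumulator and nothing to flush at the end."""
--     grouped: List[Tuple[str, List[str]]] = []
--     for line_type, content in reversed(lines):
--         if grouped and grouped[0][0] == line_type:
--             grouped[0] = (line_type, [content] + grouped[0][1])
--         else:
--             grouped.insert(0, (line_type, [content]))
--     return grouped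
-- ===== Notes on version B (the rewrite author's own statement) =====
-- stated objective: alternative
-- what changed: Builds the result back-to-front: scans the input in reverse and merges each line into the head group of the output, eliminating A's pending current_type/current_lines accumulator and its flush-at-end logic.
import Mathlib
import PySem

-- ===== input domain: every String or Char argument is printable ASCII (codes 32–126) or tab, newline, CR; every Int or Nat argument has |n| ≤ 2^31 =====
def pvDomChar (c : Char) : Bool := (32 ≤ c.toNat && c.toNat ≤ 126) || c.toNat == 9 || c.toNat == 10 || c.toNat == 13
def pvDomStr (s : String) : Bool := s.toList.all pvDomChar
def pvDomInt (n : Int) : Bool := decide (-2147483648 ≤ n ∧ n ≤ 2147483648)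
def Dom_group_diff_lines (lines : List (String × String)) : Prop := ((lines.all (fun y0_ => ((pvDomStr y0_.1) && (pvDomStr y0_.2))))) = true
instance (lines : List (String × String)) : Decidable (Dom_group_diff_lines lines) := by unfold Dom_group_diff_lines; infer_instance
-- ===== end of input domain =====

-- B builds the result back-to-front (reverse scan merging each line into the head group),
-- removing A's pending-run accumulator and flush-at-end; objective: alternative.


-- ===== PORT A =====
-- one loop iteration over state (grouped, current_type, current_lines); current_type starts as none (Python None)
def gdlStep (st : List (String × List String) × Option String × List String)
    (p : String × String) : List (String × List String) × Option String × List String :=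
  let (grouped, ct, cl) := st
  if some p.1 ≠ ct then
    (if cl ≠ [] then grouped ++ [(ct.getD "", cl)] else grouped, some p.1, [p.2])
  else
    (grouped, ct, cl ++ [p.2])

def group_diff_lines (lines : List (String × String)) : List (String × List String) :=
  if lines = [] then []
  else
    let st := lines.foldl gdlStep ([], none, [])
    if st.2.2 ≠ [] then st.1 ++ [(st.2.1.getD "", st.2.2)] else st.1

-- ===== PORT B =====
-- one iteration of B's reverse loop: merge line p into the head group of the result so far
def gdlStepB (p : String × String) (acc : List (String × List String)) : List (String × List String) :=
  match acc with
  | (u, cs) :: rest => if u = p.1 then (p.1, p.2 :: cs) :: rest else (p.1, [p.2]) :: (u, cs) :: rest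
  | [] => [(p.1, [p.2])]

def group_diff_lines_alt (lines : List (String × String)) : List (String × List String) :=
  lines.reverse.foldl (fun acc p => gdlStepB p acc) []

-- ===== PRECONDITION & SPEC =====
def Spec_group_diff_lines (lines : List (String × String)) (out : List (String × List String)) : Prop := out = group_diff_lines_alt lines
instance (lines : List (String × String)) (out : List (String × List String)) : Decidable (Spec_group_diff_lines lines out) := by unfold Spec_group_diff_lines; infer_instance

-- ===== CLAIM (what is proved, stated in full; the proofs are below) =====
def Claim_equal_group_diff_lines : Prop := ∀ (lines : List (String × String)), Dom_group_diff_lines lines → Spec_group_diff_lines lines (group_diff_lines lines)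

-- ===== LEMMAS AND PROOFS =====

-- proof-side characterisation: maximal runs of equal first component, via span
def gdlGo (lines : List (String × String)) : List (String × List String) :=
  match lines with
  | [] => []
  | (t, c) :: rest =>
    let s := rest.span (fun p => p.1 = t)
    (t, c :: s.1.map Prod.snd) :: gdlGo s.2
termination_by lines.length
decreasing_by
  simp only [List.span_eq_takeWhile_dropWhile]
  have := List.length_dropWhile_le (fun p : String × String => decide (p.1 = t)) rest
  simpa using Nat.lt_succ_of_le this

-- merging an open run (type t, contents cl so far) into the rest of the input
def gdlMerge (t : String) (cl : List String) (ls : List (String × String)) : List (String × List String) :=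
  let s := ls.span (fun p => p.1 = t)
  (t, cl ++ s.1.map Prod.snd) :: gdlGo s.2

theorem gdlGo_cons (t : String) (c : String) (rest : List (String × String)) :
    gdlGo ((t, c) :: rest) =
      (t, c :: (rest.span (fun p => p.1 = t)).1.map Prod.snd) :: gdlGo (rest.span (fun p => p.1 = t)).2 := by
  rw [gdlGo]

theorem gdlMerge_eq_go (t c : String) (rest : List (String × String)) :
    gdlMerge t [c] rest = gdlGo ((t, c) :: rest) := by
  rw [gdlGo_cons, gdlMerge]
  simp

theorem gdlMerge_cons_eq (t : String) (cl : List String) (c : String) (rest : List (String × String)) :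
    gdlMerge t cl ((t, c) :: rest) = gdlMerge t (cl ++ [c]) rest := by
  simp [gdlMerge, List.span_eq_takeWhile_dropWhile, List.takeWhile, List.dropWhile]

theorem gdlMerge_cons_ne (t : String) (cl : List String) (u c : String) (rest : List (String × String))
    (h : u ≠ t) :
    gdlMerge t cl ((u, c) :: rest) = (t, cl) :: gdlGo ((u, c) :: rest) := by
  simp [gdlMerge, List.span_eq_takeWhile_dropWhile, List.takeWhile, List.dropWhile, h]

-- loop invariant for A: with an open run, the flushed fold equals grouped ++ merge of the run into the rest
theorem gdl_loop (ls : List (String × String)) :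
    ∀ (g : List (String × List String)) (t : String) (cl : List String), cl ≠ [] →
      (let st := ls.foldl gdlStep (g, some t, cl);
       if st.2.2 ≠ [] then st.1 ++ [(st.2.1.getD "", st.2.2)] else st.1) = g ++ gdlMerge t cl ls := by
  induction ls with
  | nil =>
    intro g t cl hcl
    simp [gdlMerge, gdlGo, hcl]
  | cons p rest ih =>
    intro g t cl hcl
    obtain ⟨u, c⟩ := p
    by_cases h : u = t
    · subst h
      have : gdlStep (g, some u, cl) (u, c) = (g, some u, cl ++ [c]) := by
        simp [gdlStep]
      simp only [List.foldl_cons, this]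
      rw [ih g u (cl ++ [c]) (by simp), gdlMerge_cons_eq]
    · have : gdlStep (g, some t, cl) (u, c) = (g ++ [(t, cl)], some u, [c]) := by
        simp [gdlStep, h, hcl]
      simp only [List.foldl_cons, this]
      rw [ih (g ++ [(t, cl)]) u [c] (by simp), gdlMerge_cons_ne t cl u c rest h,
        gdlMerge_eq_go]
      simp

theorem gdl_a_eq_go (lines : List (String × String)) : group_diff_lines lines = gdlGo lines := by
  unfold group_diff_lines
  match lines with
  | [] => simp [gdlGo]
  | (t, c) :: rest =>
    simp only [reduceCtorEq, if_false]
    have h1 : gdlStep ([], none, []) (t, c) = ([], some t, [c]) := by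
      simp [gdlStep]
    simp only [List.foldl_cons, h1]
    rw [gdl_loop rest [] t [c] (by simp), gdlMerge_eq_go]
    simp

-- B's merge step applied to the grouping of the rest gives the grouping of the whole list
theorem gdlStepB_go (t c : String) (rest : List (String × String)) :
    gdlStepB (t, c) (gdlGo rest) = gdlGo ((t, c) :: rest) := by
  match rest with
  | [] => simp [gdlGo, gdlStepB]
  | (u, d) :: rest' =>
    rw [gdlGo_cons u d rest', gdlGo_cons t c ((u, d) :: rest')]
    by_cases h : u = t
    · subst h
      simp [gdlStepB, List.span_eq_takeWhile_dropWhile, List.takeWhile, List.dropWhile]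
    · simp [gdlStepB, List.span_eq_takeWhile_dropWhile, List.takeWhile,
        List.dropWhile, h, gdlGo_cons]

theorem gdl_b_eq_go (lines : List (String × String)) : group_diff_lines_alt lines = gdlGo lines := by
  unfold group_diff_lines_alt
  rw [List.foldl_reverse]
  induction lines with
  | nil => simp [gdlGo]
  | cons p rest ih =>
    obtain ⟨t, c⟩ := p
    simp only [List.foldr_cons, ih]
    exact gdlStepB_go t c rest

-- ===== VERDICT (by name: the statement is the Claim_ definition above) =====
theorem group_diff_lines_spec : Claim_equal_group_diff_lines := by
  intro lines _
  unfold Spec_group_diff_lines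
  rw [gdl_a_eq_go, gdl_b_eq_go]
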